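-- pv_equiv track=rewrite | github.com/szhongren/leetcode | 990/main.py | equationsPossible
-- ===== SOURCE A (Python) =====
-- from typing import List
--
-- def equationsPossible(equations: List[str]) -> bool:
--     """
--     same as union find
--     2 passes
--     for every a == b, we union the 2
--     then, for second pass, for every !=, check if they have different parents
--     if they have the same parent, false
--     """
--
--     def find_parent(node: str):
--         if parents[node] == node:
--             return node
--         parents[node] = find_parent(parents[node])
--         return parents[node]
--
--     def union(a: str, b: str):
--         pa, pb = find_parent(a), find_parent(b)
--         if pa != pb:
--             parents[pb] = pa
--
--     # 1st pass
--     parents = {}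
--     for equation in equations:
--         a, b = equation[0], equation[3]
--         if a not in parents:
--             parents[a] = a
--         if b not in parents:
--             parents[b] = b
--         if equation[1] == "!":
--             continue
--         union(a, b)
--
--     # 2nd pass
--     for equation in equations:
--         if equation[1] == "=":
--             continue
--         a, b = equation[0], equation[3]
--         pa, pb = find_parent(a), find_parent(b)
--         if pa == pb:
--             return False
--     return True
-- ===== SOURCE B (Python) =====
-- def equationsPossible(equations):
--     # component-label map: each seen char maps to its component's label;
--     # a merge rewrites all labels of one component to the other's label
--     comp = {}
--     for eq in equations:
--         a, b = eq[0], eq[3]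
--         comp.setdefault(a, a)
--         comp.setdefault(b, b)
--         if eq[1] != "!":
--             ca, cb = comp[a], comp[b]
--             if ca != cb:
--                 comp = {k: (ca if v == cb else v) for k, v in comp.items()}
--     return all(comp[eq[0]] != comp[eq[3]] for eq in equations if eq[1] != "=")
-- ===== Notes on version B (the rewrite author's own statement) =====
-- stated objective: alternative
-- what changed: Replaced the union-find (parent-pointer dict with recursive path-compressing find and a second find-based pass) by a flat node-to-component-label map whose merge step rewrites all labels of one component, with the final check a single all() over label lookups.
import Mathlib
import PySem

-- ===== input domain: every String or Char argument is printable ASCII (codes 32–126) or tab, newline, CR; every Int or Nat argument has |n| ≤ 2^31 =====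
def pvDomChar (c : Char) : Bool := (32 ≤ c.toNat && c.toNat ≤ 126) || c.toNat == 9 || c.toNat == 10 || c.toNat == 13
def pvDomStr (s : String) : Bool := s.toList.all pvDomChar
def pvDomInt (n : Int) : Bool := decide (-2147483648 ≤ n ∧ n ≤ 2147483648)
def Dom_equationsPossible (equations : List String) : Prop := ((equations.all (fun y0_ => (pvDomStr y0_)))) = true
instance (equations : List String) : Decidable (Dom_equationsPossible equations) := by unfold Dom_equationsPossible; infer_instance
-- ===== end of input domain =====

-- B replaces A's union-find (parent pointers, recursive find with path compression) by a
-- direct node→component-label map whose merges rewrite one component's labels; objective: alternative.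

-- ===== PORT A =====
-- find_parent: Python recurses along parent pointers without bound; the fuel (dict size + 1)
-- provably suffices on every dict A builds (see lemmas below); the fuel-0 and missing-key
-- fallbacks are totality guards only, unreachable in A's calls.
def findA : Nat → PySem.Dict Char Char → Char → Char × PySem.Dict Char Char
  | 0, d, x => (x, d)
  | f+1, d, x =>
    let p := d.getD x x
    if p = x then (x, d)
    else
      let r := (findA f d p).1
      let d' := (findA f d p).2
      (r, d'.insert x r)

def unionA (d : PySem.Dict Char Char) (a b : Char) : PySem.Dict Char Char :=
  let pa := (findA (d.size + 1) d a).1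
  let d1 := (findA (d.size + 1) d a).2
  let pb := (findA (d1.size + 1) d1 b).1
  let d2 := (findA (d1.size + 1) d1 b).2
  if pa ≠ pb then d2.insert pb pa else d2

-- first pass: seed endpoints, union unless the operator char is '!'
-- (equation[0]/[3]/[1] exist under Pre_; the ' ' defaults are unreachable totality guards)
def stepA (d : PySem.Dict Char Char) (e : String) : PySem.Dict Char Char :=
  let a := ((PySem.Str.pyGet? e 0).getD ' ')
  let b := ((PySem.Str.pyGet? e 3).getD ' ')
  let d := if d.contains a then d else d.insert a a
  let d := if d.contains b then d else d.insert b b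
  if (PySem.Str.pyGet? e 1).getD ' ' = '!' then d else unionA d a b

-- second pass: early-return False when an inequality's endpoints share a root
def pass2A : PySem.Dict Char Char → List String → Bool
  | _, [] => true
  | d, e :: rest =>
    if (PySem.Str.pyGet? e 1).getD ' ' = '=' then pass2A d rest
    else
      let a := ((PySem.Str.pyGet? e 0).getD ' ')
      let b := ((PySem.Str.pyGet? e 3).getD ' ')
      let pa := (findA (d.size + 1) d a).1
      let d1 := (findA (d.size + 1) d a).2
      let pb := (findA (d1.size + 1) d1 b).1
      let d2 := (findA (d1.size + 1) d1 b).2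
      if pa = pb then false else pass2A d2 rest

def equationsPossible (equations : List String) : Bool :=
  pass2A (equations.foldl stepA PySem.Dict.empty) equations

-- ===== PORT B =====
-- component-label map; a merge rewrites every label of b's component to a's label
def stepB (c : PySem.Dict Char Char) (e : String) : PySem.Dict Char Char :=
  let a := ((PySem.Str.pyGet? e 0).getD ' ')
  let b := ((PySem.Str.pyGet? e 3).getD ' ')
  let c := c.setdefault a a
  let c := c.setdefault b b
  if (PySem.Str.pyGet? e 1).getD ' ' ≠ '!' then
    let ca := c.getD a a
    let cb := c.getD b b
    if ca ≠ cb then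
      PySem.Dict.mk (c.items.map (fun kv => (kv.1, if kv.2 = cb then ca else kv.2)))
    else c
  else c

def equationsPossible_alt (equations : List String) : Bool :=
  let comp := equations.foldl stepB PySem.Dict.empty
  equations.all (fun e =>
    if (PySem.Str.pyGet? e 1).getD ' ' = '=' then true
    else decide (comp.getD ((PySem.Str.pyGet? e 0).getD ' ') ((PySem.Str.pyGet? e 0).getD ' ')
               ≠ comp.getD ((PySem.Str.pyGet? e 3).getD ' ') ((PySem.Str.pyGet? e 3).getD ' ')))

-- ===== PRECONDITION & SPEC =====
-- A (and B) index equation[0], equation[1], equation[3]: Python raises IndexError on a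
-- string of fewer than 4 characters, so exactly those inputs are excluded.
def Pre_equationsPossible (equations : List String) : Prop :=
  ∀ e ∈ equations, 4 ≤ e.toList.length

instance (equations : List String) : Decidable (Pre_equationsPossible equations) := by
  unfold Pre_equationsPossible; infer_instance

def pvWitness_equationsPossible : List String := ["a==b", "b==c", "a!=d"]

def Spec_equationsPossible (equations : List String) (out : Bool) : Prop := out = equationsPossible_alt equations
instance (equations : List String) (out : Bool) : Decidable (Spec_equationsPossible equations out) := by unfold Spec_equationsPossible; infer_instance

-- ===== CLAIM (what is proved, stated in full; the proofs are below) =====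
def Claim_equal_equationsPossible : Prop := ∀ (equations : List String), Dom_equationsPossible equations → Pre_equationsPossible equations → Spec_equationsPossible equations (equationsPossible equations)

-- ===== LEMMAS AND PROOFS =====

-- abbreviations for the three characters an equation is read by
def eqa (e : String) : Char := (PySem.Str.pyGet? e 0).getD ' '
def eqb (e : String) : Char := (PySem.Str.pyGet? e 3).getD ' '
def eqop (e : String) : Char := (PySem.Str.pyGet? e 1).getD ' '

-- parent-pointer chain of A's dict, with fuel
def chainA : Nat → PySem.Dict Char Char → Char → Char
  | 0, _, x => x
  | n+1, d, x => if d.getD x x = x then x else chainA n d (d.getD x x)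

def IsRootD (d : PySem.Dict Char Char) (r : Char) : Prop := d.getD r r = r

def RootsTo (d : PySem.Dict Char Char) (x r : Char) : Prop :=
  ∃ n, chainA n d x = r ∧ IsRootD d r

-- shared root (same union-find component)
def SR (d : PySem.Dict Char Char) (x y : Char) : Prop :=
  ∃ r, RootsTo d x r ∧ RootsTo d y r

-- height certificate: parent pointers strictly decrease h and stay inside the key set
def CertH (d : PySem.Dict Char Char) (h : Char → Nat) : Prop :=
  ∀ k v, d.get? k = some v → v ≠ k → h v < h k ∧ (d.get? v).isSome

-- d' differs from d only by repointing existing keys directly at their d-root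
def Repoint (d d' : PySem.Dict Char Char) : Prop :=
  ∀ y, d'.get? y = d.get? y ∨
    ((d.get? y).isSome ∧ ∃ ry, d'.get? y = some ry ∧ RootsTo d y ry)

-- the full invariant tying A's parent dict to B's label dict
def INV (d c : PySem.Dict Char Char) : Prop :=
  d.keys.Nodup ∧ c.keys.Nodup ∧
  (∀ y, (d.get? y).isSome ↔ (c.get? y).isSome) ∧
  (∃ h, CertH d h) ∧
  (∀ x v, c.get? x = some v → (c.get? v).isSome) ∧
  (∀ x y, (d.get? x).isSome → (d.get? y).isSome →
     (SR d x y ↔ c.getD x x = c.getD y y))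

lemma nonroot_get? {d : PySem.Dict Char Char} {x : Char} (hx : ¬ IsRootD d x) :
    d.get? x = some (d.getD x x) ∧ d.getD x x ≠ x := by
  unfold IsRootD at hx
  rcases hg : d.get? x with _ | v
  · exact absurd (by simp [PySem.Dict.getD_eq_get?_getD, hg]) hx
  · refine ⟨by simp [PySem.Dict.getD_eq_get?_getD, hg], ?_⟩
    simpa [PySem.Dict.getD_eq_get?_getD, hg] using hx

lemma chainA_stop {d : PySem.Dict Char Char} {x : Char} (hx : IsRootD d x) :
    ∀ n, chainA n d x = x := by
  intro n; cases n with
  | zero => rfl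
  | succ n => unfold IsRootD at hx; simp [chainA, hx]

lemma chainA_add (d : PySem.Dict Char Char) (m n : Nat) (x : Char) :
    chainA (m + n) d x = chainA n d (chainA m d x) := by
  induction m generalizing x with
  | zero => rw [Nat.zero_add]; rfl
  | succ m ih =>
    by_cases hr : d.getD x x = x
    · rw [chainA_stop (show IsRootD d x from hr), chainA_stop (show IsRootD d x from hr),
        chainA_stop (show IsRootD d x from hr)]
    · have heq : m + 1 + n = (m + n) + 1 := by omega
      rw [heq]
      show (if d.getD x x = x then x else chainA (m + n) d (d.getD x x))
        = chainA n d (if d.getD x x = x then x else chainA m d (d.getD x x))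
      rw [if_neg hr, if_neg hr]
      exact ih _

lemma rootsTo_self {d : PySem.Dict Char Char} {x : Char} (hx : IsRootD d x) :
    RootsTo d x x := ⟨0, rfl, hx⟩

lemma rootsTo_unique {d : PySem.Dict Char Char} {x r r' : Char}
    (h1 : RootsTo d x r) (h2 : RootsTo d x r') : r = r' := by
  obtain ⟨n, hn, hr⟩ := h1
  obtain ⟨n', hn', hr'⟩ := h2
  rcases le_total n n' with hle | hle
  · have := chainA_add d n (n' - n) x
    rw [show n + (n' - n) = n' from by omega, hn', hn, chainA_stop hr] at this
    exact this.symm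
  · have := chainA_add d n' (n - n') x
    rw [show n' + (n - n') = n from by omega, hn, hn', chainA_stop hr'] at this
    exact this

lemma rootsTo_step {d : PySem.Dict Char Char} {x p r : Char}
    (hx : d.getD x x = p) (hne : p ≠ x) (h : RootsTo d p r) : RootsTo d x r := by
  obtain ⟨n, hn, hr⟩ := h
  exact ⟨n + 1, by simpa [chainA, hx, hne] using hn, hr⟩

lemma rootsTo_destep {d : PySem.Dict Char Char} {x r : Char}
    (hnr : ¬ IsRootD d x) (h : RootsTo d x r) : RootsTo d (d.getD x x) r := by
  obtain ⟨n, hn, hr⟩ := h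
  cases n with
  | zero => exact absurd ((show x = r from hn) ▸ hr) hnr
  | succ n =>
    unfold IsRootD at hnr
    exact ⟨n, by simpa [chainA, hnr] using hn, hr⟩

lemma chain_desc {d : PySem.Dict Char Char} {h : Char → Nat} (hc : CertH d h) :
    ∀ n x, ¬ IsRootD d (chainA n d x) → h (chainA n d x) + n ≤ h x := by
  intro n
  induction n with
  | zero => intro x _; simp [chainA]
  | succ n ih =>
    intro x hnr
    by_cases hr : d.getD x x = x
    · exact absurd (by rw [chainA_stop hr]; exact hr) hnr
    · have hg : d.get? x = some (d.getD x x) := (nonroot_get? hr).1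
      have hlt := (hc _ _ hg hr).1
      have hstep : chainA (n+1) d x = chainA n d (d.getD x x) := by
        simp [chainA, hr]
      rw [hstep] at hnr ⊢
      have := ih (d.getD x x) hnr
      omega

lemma roots_exist {d : PySem.Dict Char Char} {h : Char → Nat} (hc : CertH d h) (x : Char) :
    ∃ r, RootsTo d x r := by
  by_cases hr : IsRootD d (chainA (h x + 1) d x)
  · exact ⟨_, ⟨_, rfl, hr⟩⟩
  · have := chain_desc hc (h x + 1) x hr
    omega

lemma root_h_le {d : PySem.Dict Char Char} {h : Char → Nat} (hc : CertH d h) :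
    ∀ {x r}, RootsTo d x r → h r ≤ h x := by
  intro x r hxr
  obtain ⟨n, hn, hr⟩ := hxr
  induction n generalizing x with
  | zero => subst hn; rfl
  | succ n ih =>
    by_cases hrx : d.getD x x = x
    · rw [chainA_stop hrx] at hn; subst hn; rfl
    · have hg : d.get? x = some (d.getD x x) := (nonroot_get? hrx).1
      have hlt := (hc _ _ hg hrx).1
      have hstep : chainA (n+1) d x = chainA n d (d.getD x x) := by simp [chainA, hrx]
      rw [hstep] at hn
      exact le_trans (ih hn) (le_of_lt hlt)

lemma root_h_lt {d : PySem.Dict Char Char} {h : Char → Nat} (hc : CertH d h)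
    {x r : Char} (hnr : ¬ IsRootD d x) (hxr : RootsTo d x r) : h r < h x := by
  have hg := nonroot_get? hnr
  have hp : RootsTo d (d.getD x x) r := rootsTo_destep hnr hxr
  exact lt_of_le_of_lt (root_h_le hc hp) (hc _ _ hg.1 hg.2).1

lemma root_isSome {d : PySem.Dict Char Char} {h : Char → Nat} (hc : CertH d h) :
    ∀ {x r}, (d.get? x).isSome → RootsTo d x r → (d.get? r).isSome := by
  intro x r hx hxr
  obtain ⟨n, hn, hr⟩ := hxr
  induction n generalizing x with
  | zero => subst hn; exact hx
  | succ n ih =>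
    by_cases hrx : d.getD x x = x
    · rw [chainA_stop hrx] at hn; subst hn; exact hx
    · have hg := nonroot_get? hrx
      have hstep : chainA (n+1) d x = chainA n d (d.getD x x) := by simp [chainA, hrx]
      rw [hstep] at hn
      exact ih (hc _ _ hg.1 hg.2).2 hn

lemma isSome_iff_mem_keys (d : PySem.Dict Char Char) (x : Char) :
    (d.get? x).isSome ↔ x ∈ d.keys := by
  rw [Option.isSome_iff_ne_none]
  constructor
  · intro h
    by_contra hmem
    exact h ((PySem.Dict.get?_eq_none_iff_not_mem_keys _ _).mpr hmem)
  · intro h hnone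
    exact ((PySem.Dict.get?_eq_none_iff_not_mem_keys _ _).mp hnone) h

lemma reach_size {d : PySem.Dict Char Char} {h : Char → Nat} (hc : CertH d h)
    (hnd : d.keys.Nodup) (x : Char) : IsRootD d (chainA d.size d x) := by
  by_contra hnr
  have hmono : ∀ k, k ≤ d.size → ¬ IsRootD d (chainA k d x) := by
    intro k hk hroot
    apply hnr
    have hadd := chainA_add d k (d.size - k) x
    rw [show k + (d.size - k) = d.size from by omega] at hadd
    rw [hadd, chainA_stop hroot]
    exact hroot
  have hdesc : ∀ k l, k < l → l ≤ d.size → h (chainA l d x) < h (chainA k d x) := by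
    intro k l hkl hl
    have hadd := chainA_add d k (l - k) x
    rw [show k + (l - k) = l from by omega] at hadd
    have hnr' : ¬ IsRootD d (chainA (l - k) d (chainA k d x)) := by
      rw [← hadd]; exact hmono l hl
    have hle := chain_desc hc (l - k) (chainA k d x) hnr'
    rw [← hadd] at hle
    omega
  have hkey : ∀ k, k ≤ d.size → chainA k d x ∈ d.keys := by
    intro k hk
    have hg := nonroot_get? (hmono k hk)
    rw [← isSome_iff_mem_keys]
    simp [hg.1]
  have hinj : Set.InjOn (fun k : Fin (d.size + 1) => chainA k d x)
      ↑(Finset.univ : Finset (Fin (d.size + 1))) := by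
    intro k _ l _ heq
    simp only at heq
    by_contra hne
    rcases Nat.lt_or_ge k.val l.val with h1 | h1
    · have := hdesc k.val l.val h1 (Nat.lt_succ_iff.mp l.isLt)
      rw [heq] at this
      exact lt_irrefl _ this
    · have h2 : l.val < k.val := by
        rcases Nat.lt_or_ge l.val k.val with h2 | h2
        · exact h2
        · exact absurd (Fin.ext (by omega)) hne
      have := hdesc l.val k.val h2 (Nat.lt_succ_iff.mp k.isLt)
      rw [heq] at this
      exact lt_irrefl _ this
  have hcard := Finset.card_le_card_of_injOn (fun k : Fin (d.size + 1) => chainA k d x)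
      (fun k _ => List.mem_toFinset.mpr (hkey k.val (Nat.lt_succ_iff.mp k.isLt))) hinj
  have h1 : (Finset.univ : Finset (Fin (d.size + 1))).card = d.size + 1 := by simp
  have h2 : d.keys.toFinset.card ≤ d.keys.length := d.keys.toFinset_card_le
  have h3 : d.keys.length = d.size := by
    simp [PySem.Dict.keys, PySem.Dict.size]
  omega

-- SR basics
lemma sr_symm {d : PySem.Dict Char Char} {x y : Char} (h : SR d x y) : SR d y x := by
  obtain ⟨r, h1, h2⟩ := h; exact ⟨r, h2, h1⟩

lemma sr_trans {d : PySem.Dict Char Char} {x y z : Char} (h1 : SR d x y) (h2 : SR d y z) :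
    SR d x z := by
  obtain ⟨r, hx, hy⟩ := h1
  obtain ⟨r', hy', hz⟩ := h2
  exact ⟨r, hx, (rootsTo_unique hy' hy) ▸ hz⟩

-- ===== Repoint: path compression preserves everything =====

lemma repoint_refl (d : PySem.Dict Char Char) : Repoint d d := fun _ => Or.inl rfl

lemma repoint_rootsTo_fwd {d d' : PySem.Dict Char Char} {h : Char → Nat}
    (hc : CertH d h) (hrp : Repoint d d') :
    ∀ {y s}, RootsTo d y s → RootsTo d' y s := by
  have hroot' : ∀ {z}, IsRootD d z → IsRootD d' z := by
    intro z hz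
    rcases hrp z with hsame | ⟨hk, rz, hrz, hroots⟩
    · unfold IsRootD at hz ⊢
      rw [PySem.Dict.getD_eq_get?_getD, hsame, ← PySem.Dict.getD_eq_get?_getD]
      exact hz
    · have : rz = z := rootsTo_unique hroots (rootsTo_self hz)
      subst this
      unfold IsRootD
      rw [PySem.Dict.getD_eq_get?_getD, hrz]
      rfl
  suffices H : ∀ n y s, chainA n d y = s → IsRootD d s → RootsTo d' y s by
    intro y s h
    obtain ⟨n, hn, hr⟩ := h
    exact H n y s hn hr
  intro n
  induction n with
  | zero =>
    intro y s hn hr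
    subst hn
    exact rootsTo_self (hroot' hr)
  | succ n ih =>
    intro y s hn hr
    by_cases hry : d.getD y y = y
    · rw [chainA_stop hry] at hn
      subst hn
      exact rootsTo_self (hroot' hr)
    · have hg := nonroot_get? hry
      have hn' : chainA n d (d.getD y y) = s := by simpa [chainA, hry] using hn
      have hps : RootsTo d' (d.getD y y) s := ih _ _ hn' hr
      rcases hrp y with hsame | ⟨hk, ry, hryy, hroots⟩
      · refine rootsTo_step (p := d.getD y y) ?_ hg.2 hps
        rw [PySem.Dict.getD_eq_get?_getD, hsame, ← PySem.Dict.getD_eq_get?_getD]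
      · have hys : RootsTo d y s := rootsTo_step rfl hg.2 ⟨n, hn', hr⟩
        have hrys : ry = s := rootsTo_unique hroots hys
        rw [hrys] at hryy
        by_cases hsy : s = y
        · subst hsy
          refine rootsTo_self ?_
          unfold IsRootD
          rw [PySem.Dict.getD_eq_get?_getD, hryy]
          rfl
        · obtain ⟨m, _, hrs⟩ := hps
          refine rootsTo_step (p := s) ?_ hsy (rootsTo_self hrs)
          rw [PySem.Dict.getD_eq_get?_getD, hryy]
          rfl

lemma repoint_rootsTo {d d' : PySem.Dict Char Char} {h : Char → Nat}
    (hc : CertH d h) (hrp : Repoint d d') (y s : Char) :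
    RootsTo d' y s ↔ RootsTo d y s := by
  constructor
  · intro h'
    obtain ⟨r, hr⟩ := roots_exist hc y
    have h2 := repoint_rootsTo_fwd hc hrp hr
    rwa [rootsTo_unique h' h2]
  · exact repoint_rootsTo_fwd hc hrp

lemma repoint_keys {d d' : PySem.Dict Char Char} (hrp : Repoint d d') (y : Char) :
    (d'.get? y).isSome ↔ (d.get? y).isSome := by
  rcases hrp y with hsame | ⟨hk, ry, hry, _⟩
  · rw [hsame]
  · simp [hry, hk]

lemma repoint_cert {d d' : PySem.Dict Char Char} {h : Char → Nat}
    (hc : CertH d h) (hrp : Repoint d d') : CertH d' h := by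
  intro k v hkv hne
  rcases hrp k with hsame | ⟨hk, rk, hrk, hroots⟩
  · rw [hsame] at hkv
    obtain ⟨h1, h2⟩ := hc k v hkv hne
    exact ⟨h1, (repoint_keys hrp v).mpr h2⟩
  · rw [hrk] at hkv
    have hv : v = rk := by injection hkv.symm
    subst hv
    have hnr : ¬ IsRootD d k := by
      intro hr
      exact hne (rootsTo_unique hroots (rootsTo_self hr))
    refine ⟨root_h_lt hc hnr hroots, ?_⟩
    exact (repoint_keys hrp v).mpr (root_isSome hc hk hroots)

lemma repoint_trans {d d1 d2 : PySem.Dict Char Char} {h : Char → Nat}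
    (hc : CertH d h) (h1 : Repoint d d1) (h2 : Repoint d1 d2) : Repoint d d2 := by
  intro y
  rcases h2 y with hsame | ⟨hk1, ry, hry, hroots1⟩
  · rcases h1 y with hs1 | ⟨hk, ry, hry, hroots⟩
    · exact Or.inl (hsame.trans hs1)
    · exact Or.inr ⟨hk, ry, hsame.trans hry, hroots⟩
  · refine Or.inr ⟨(repoint_keys h1 y).mp hk1, ry, hry, ?_⟩
    exact (repoint_rootsTo hc h1 y ry).mp hroots1

-- ===== findA =====

lemma findA_run {d : PySem.Dict Char Char} {h : Char → Nat} (hc : CertH d h) :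
    ∀ (fuel : Nat) (x : Char), (∃ n ≤ fuel, IsRootD d (chainA n d x)) →
      RootsTo d x (findA fuel d x).1 ∧ Repoint d (findA fuel d x).2 := by
  intro fuel
  induction fuel with
  | zero =>
    rintro x ⟨n, hn, hr⟩
    have hn0 : n = 0 := by omega
    subst hn0
    exact ⟨rootsTo_self hr, repoint_refl d⟩
  | succ fuel ih =>
    rintro x ⟨n, hn, hr⟩
    by_cases hroot : d.getD x x = x
    · simp only [findA, hroot, if_pos]
      exact ⟨rootsTo_self hroot, repoint_refl d⟩
    · have hg := nonroot_get? hroot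
      have hn' : ∃ m ≤ fuel, IsRootD d (chainA m d (d.getD x x)) := by
        cases n with
        | zero => exact absurd hr hroot
        | succ m =>
          refine ⟨m, by omega, ?_⟩
          simpa [chainA, hroot] using hr
      obtain ⟨hroots, hrp⟩ := ih (d.getD x x) hn'
      have heq1 : (findA (fuel + 1) d x).1 = (findA fuel d (d.getD x x)).1 := by
        simp only [findA, if_neg hroot]
      have heq2 : (findA (fuel + 1) d x).2
          = ((findA fuel d (d.getD x x)).2).insert x (findA fuel d (d.getD x x)).1 := by
        simp only [findA, if_neg hroot]
      constructor
      · rw [heq1]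
        exact rootsTo_step rfl hg.2 hroots
      · rw [heq2]
        intro y
        by_cases hyx : y = x
        · subst hyx
          refine Or.inr ⟨by simp [hg.1], (findA fuel d (d.getD y y)).1, ?_, ?_⟩
          · exact PySem.Dict.get?_insert_self _ y _
          · exact rootsTo_step rfl hg.2 hroots
        · rw [PySem.Dict.get?_insert_of_ne _ _ hyx]
          exact hrp y

lemma findA_nodup : ∀ (fuel : Nat) (d : PySem.Dict Char Char) (x : Char),
    d.keys.Nodup → ((findA fuel d x).2).keys.Nodup := by
  intro fuel
  induction fuel with
  | zero => intro d x hnd; exact hnd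
  | succ fuel ih =>
    intro d x hnd
    by_cases hroot : d.getD x x = x
    · simpa only [findA, hroot, if_pos] using hnd
    · simp only [findA, if_neg hroot]
      exact PySem.Dict.nodup_keys_insert _ _ _ (ih d _ hnd)

lemma findA_spec {d : PySem.Dict Char Char} {h : Char → Nat} (hc : CertH d h)
    (hnd : d.keys.Nodup) (x : Char) :
    RootsTo d x (findA (d.size + 1) d x).1 ∧ Repoint d (findA (d.size + 1) d x).2 :=
  findA_run hc _ x ⟨d.size, by omega, reach_size hc hnd x⟩

-- ===== fresh self-insert =====

lemma fresh_insert_roots {d : PySem.Dict Char Char} {a : Char} (ha : d.get? a = none)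
    (y s : Char) : RootsTo (d.insert a a) y s ↔ RootsTo d y s := by
  have hrootiff : ∀ z, IsRootD (d.insert a a) z ↔ IsRootD d z := by
    intro z
    by_cases hza : z = a
    · subst hza
      unfold IsRootD
      rw [PySem.Dict.getD_eq_get?_getD, PySem.Dict.get?_insert_self,
        PySem.Dict.getD_eq_get?_getD, ha]
      simp
    · unfold IsRootD
      rw [PySem.Dict.getD_eq_get?_getD, PySem.Dict.get?_insert_of_ne _ _ hza,
        ← PySem.Dict.getD_eq_get?_getD]
  constructor
  · suffices H : ∀ n y s, chainA n (d.insert a a) y = s → IsRootD (d.insert a a) s →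
        RootsTo d y s by
      rintro ⟨n, hn, hr⟩; exact H n y s hn hr
    intro n
    induction n with
    | zero =>
      intro y s hn hr; subst hn
      exact rootsTo_self ((hrootiff y).mp hr)
    | succ n ih =>
      intro y s hn hr
      by_cases hry : (d.insert a a).getD y y = y
      · rw [chainA_stop hry] at hn; subst hn
        exact rootsTo_self ((hrootiff y).mp hry)
      · have hg := nonroot_get? hry
        have hn' : chainA n (d.insert a a) ((d.insert a a).getD y y) = s := by
          simpa [chainA, hry] using hn
        have hya : y ≠ a := by
          intro hya; subst hya
          apply hry
          rw [PySem.Dict.getD_eq_get?_getD, PySem.Dict.get?_insert_self]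
          rfl
        have hsame : (d.insert a a).getD y y = d.getD y y := by
          rw [PySem.Dict.getD_eq_get?_getD, PySem.Dict.get?_insert_of_ne _ _ hya,
            ← PySem.Dict.getD_eq_get?_getD]
        refine rootsTo_step (p := d.getD y y) rfl ?_ ?_
        · rw [← hsame]; exact hg.2
        · rw [← hsame]; exact ih _ _ hn' hr
  · suffices H : ∀ n y s, chainA n d y = s → IsRootD d s → RootsTo (d.insert a a) y s by
      rintro ⟨n, hn, hr⟩; exact H n y s hn hr
    intro n
    induction n with
    | zero =>
      intro y s hn hr; subst hn
      exact rootsTo_self ((hrootiff y).mpr hr)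
    | succ n ih =>
      intro y s hn hr
      by_cases hry : d.getD y y = y
      · rw [chainA_stop hry] at hn; subst hn
        exact rootsTo_self ((hrootiff y).mpr hry)
      · have hg := nonroot_get? hry
        have hn' : chainA n d (d.getD y y) = s := by simpa [chainA, hry] using hn
        have hya : y ≠ a := by
          intro hya; subst hya
          have h1 := hg.1
          rw [ha] at h1
          exact absurd h1 (by simp)
        have hsame : (d.insert a a).getD y y = d.getD y y := by
          rw [PySem.Dict.getD_eq_get?_getD, PySem.Dict.get?_insert_of_ne _ _ hya,
            ← PySem.Dict.getD_eq_get?_getD]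
        refine rootsTo_step (p := d.getD y y) hsame hg.2 (ih _ _ hn' hr)

lemma fresh_insert_cert {d : PySem.Dict Char Char} {h : Char → Nat} {a : Char}
    (hc : CertH d h) (ha : d.get? a = none) : CertH (d.insert a a) h := by
  intro k v hkv hne
  by_cases hka : k = a
  · subst hka
    rw [PySem.Dict.get?_insert_self] at hkv
    exact absurd (by injection hkv.symm) hne
  · rw [PySem.Dict.get?_insert_of_ne _ _ hka] at hkv
    obtain ⟨h1, h2⟩ := hc k v hkv hne
    refine ⟨h1, ?_⟩
    by_cases hva : v = a
    · subst hva; rw [PySem.Dict.get?_insert_self]; rfl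
    · rw [PySem.Dict.get?_insert_of_ne _ _ hva]; exact h2

-- ===== linking two roots =====

lemma link_roots {d : PySem.Dict Char Char} {h : Char → Nat} (hc : CertH d h)
    {ra rb : Char} (hrb : IsRootD d rb) (hra : IsRootD d ra) (hne : ra ≠ rb)
    (y s : Char) :
    RootsTo (d.insert rb ra) y s ↔ (RootsTo d y s ∧ s ≠ rb) ∨ (RootsTo d y rb ∧ s = ra) := by
  have hgetne : ∀ z, z ≠ rb → (d.insert rb ra).getD z z = d.getD z z := by
    intro z hz
    rw [PySem.Dict.getD_eq_get?_getD, PySem.Dict.get?_insert_of_ne _ _ hz,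
      ← PySem.Dict.getD_eq_get?_getD]
  have hgetrb : (d.insert rb ra).getD rb rb = ra := by
    rw [PySem.Dict.getD_eq_get?_getD, PySem.Dict.get?_insert_self _ rb _]
    rfl
  have hra' : IsRootD (d.insert rb ra) ra := by
    unfold IsRootD
    rw [hgetne ra hne]
    exact hra
  have hroot' : ∀ z, IsRootD d z → z ≠ rb → IsRootD (d.insert rb ra) z := by
    intro z hz hzrb
    unfold IsRootD
    rw [hgetne z hzrb]
    exact hz
  have fwd : ∀ n y s, chainA n d y = s → IsRootD d s → s ≠ rb → RootsTo (d.insert rb ra) y s := by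
    intro n
    induction n with
    | zero =>
      intro y s hn hs hsrb; subst hn
      exact rootsTo_self (hroot' y hs hsrb)
    | succ n ih =>
      intro y s hn hs hsrb
      by_cases hry : d.getD y y = y
      · rw [chainA_stop hry] at hn; subst hn
        exact rootsTo_self (hroot' y hry hsrb)
      · have hg := nonroot_get? hry
        have hn' : chainA n d (d.getD y y) = s := by simpa [chainA, hry] using hn
        have hyrb : y ≠ rb := fun he => hry (he ▸ hrb)
        exact rootsTo_step (hgetne y hyrb) hg.2 (ih _ _ hn' hs hsrb)
  have fwd2 : ∀ n y, chainA n d y = rb → RootsTo (d.insert rb ra) y ra := by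
    intro n
    induction n with
    | zero =>
      intro y hn; subst hn
      exact rootsTo_step hgetrb hne (rootsTo_self hra')
    | succ n ih =>
      intro y hn
      by_cases hry : d.getD y y = y
      · rw [chainA_stop hry] at hn; subst hn
        exact rootsTo_step hgetrb hne (rootsTo_self hra')
      · have hg := nonroot_get? hry
        have hn' : chainA n d (d.getD y y) = rb := by simpa [chainA, hry] using hn
        have hyrb : y ≠ rb := fun he => hry (he ▸ hrb)
        exact rootsTo_step (hgetne y hyrb) hg.2 (ih _ hn')
  constructor
  · intro h'
    obtain ⟨r0, h0⟩ := roots_exist hc y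
    obtain ⟨n0, hn0, hr0⟩ := h0
    by_cases hcase : r0 = rb
    · subst hcase
      have h2 := fwd2 n0 y hn0
      have hs := rootsTo_unique h' h2
      exact Or.inr ⟨⟨n0, hn0, hr0⟩, hs⟩
    · have h2 := fwd n0 y r0 hn0 hr0 hcase
      have hs := rootsTo_unique h' h2
      subst hs
      exact Or.inl ⟨⟨n0, hn0, hr0⟩, hcase⟩
  · rintro (⟨⟨n, hn, hr⟩, hsne⟩ | ⟨⟨n, hn, _⟩, rfl⟩)
    · exact fwd n y s hn hr hsne
    · exact fwd2 n y hn

lemma link_cert {d : PySem.Dict Char Char} {h : Char → Nat} (hc : CertH d h)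
    {ra rb : Char} (hrb : IsRootD d rb) (hra : IsRootD d ra) (hne : ra ≠ rb)
    (hraSome : (d.get? ra).isSome) : ∃ h', CertH (d.insert rb ra) h' := by
  refine ⟨fun y => @ite _ (RootsTo d y rb) (Classical.propDecidable _) (h y + h ra + 1) (h y), ?_⟩
  intro k v hkv hvk
  dsimp only
  have hnotra : ¬ RootsTo d ra rb := by
    intro hx
    exact hne (rootsTo_unique (rootsTo_self hra) hx)
  by_cases hkrb : k = rb
  · rw [hkrb] at hkv ⊢
    rw [PySem.Dict.get?_insert_self _ rb _] at hkv
    have hv : v = ra := by injection hkv.symm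
    subst hv
    rw [if_pos (rootsTo_self hrb), if_neg hnotra]
    constructor
    · omega
    · rw [PySem.Dict.get?_insert_of_ne _ _ hne]
      exact hraSome
  · rw [PySem.Dict.get?_insert_of_ne _ _ hkrb] at hkv
    obtain ⟨h1, h2⟩ := hc k v hkv hvk
    have hknr : ¬ IsRootD d k := by
      intro hr
      unfold IsRootD at hr
      rw [PySem.Dict.getD_eq_get?_getD, hkv] at hr
      exact hvk hr
    have hiff : RootsTo d k rb ↔ RootsTo d v rb := by
      constructor
      · intro hx
        have := rootsTo_destep hknr hx
        rwa [show d.getD k k = v from by rw [PySem.Dict.getD_eq_get?_getD, hkv]; rfl] at this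
      · intro hx
        exact rootsTo_step (by rw [PySem.Dict.getD_eq_get?_getD, hkv]; rfl) hvk hx
    have hvsome' : ((d.insert rb ra).get? v).isSome := by
      by_cases hvrb : v = rb
      · rw [hvrb, PySem.Dict.get?_insert_self _ rb _]; rfl
      · rw [PySem.Dict.get?_insert_of_ne _ _ hvrb]; exact h2
    by_cases hkreach : RootsTo d k rb
    · rw [if_pos hkreach, if_pos (hiff.mp hkreach)]
      exact ⟨by omega, hvsome'⟩
    · rw [if_neg hkreach, if_neg (fun hx => hkreach (hiff.mpr hx))]
      exact ⟨h1, hvsome'⟩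

-- ===== unionA =====

lemma unionA_spec {d : PySem.Dict Char Char} {h : Char → Nat} (hc : CertH d h)
    (hnd : d.keys.Nodup) {a b : Char} (hA : (d.get? a).isSome) (hB : (d.get? b).isSome) :
    (∃ h', CertH (unionA d a b) h') ∧ (unionA d a b).keys.Nodup ∧
    (∀ y, ((unionA d a b).get? y).isSome ↔ (d.get? y).isSome) ∧
    (∀ x y, SR (unionA d a b) x y ↔
      (SR d x y ∨ (SR d x a ∧ SR d y b) ∨ (SR d x b ∧ SR d y a))) := by
  obtain ⟨hRa, hrp1⟩ := findA_spec hc hnd a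
  set pa := (findA (d.size + 1) d a).1 with hpa
  set d1 := (findA (d.size + 1) d a).2 with hd1
  have hc1 : CertH d1 h := repoint_cert hc hrp1
  have hnd1 : d1.keys.Nodup := findA_nodup _ _ _ hnd
  obtain ⟨hRb1, hrp2⟩ := findA_spec hc1 hnd1 b
  set pb := (findA (d1.size + 1) d1 b).1 with hpb
  set d2 := (findA (d1.size + 1) d1 b).2 with hd2
  have hRb : RootsTo d b pb := (repoint_rootsTo hc hrp1 b pb).mp hRb1
  have hrp : Repoint d d2 := repoint_trans hc hrp1 hrp2
  have hc2 : CertH d2 h := repoint_cert hc hrp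
  have hnd2 : d2.keys.Nodup := findA_nodup _ _ _ hnd1
  have hroots2 : ∀ y s, RootsTo d2 y s ↔ RootsTo d y s := repoint_rootsTo hc hrp
  have hkeys2 : ∀ y, (d2.get? y).isSome ↔ (d.get? y).isSome := repoint_keys hrp
  have hun : unionA d a b = if pa ≠ pb then d2.insert pb pa else d2 := rfl
  rw [hun]
  by_cases hpab : pa = pb
  · rw [if_neg (by simpa using hpab)]
    have hab : SR d a b := ⟨pa, hRa, hpab ▸ hRb⟩
    refine ⟨⟨h, hc2⟩, hnd2, hkeys2, ?_⟩
    intro x y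
    have hSR2 : SR d2 x y ↔ SR d x y := by
      constructor
      · rintro ⟨r, h1, h2⟩; exact ⟨r, (hroots2 _ _).mp h1, (hroots2 _ _).mp h2⟩
      · rintro ⟨r, h1, h2⟩; exact ⟨r, (hroots2 _ _).mpr h1, (hroots2 _ _).mpr h2⟩
    rw [hSR2]
    constructor
    · exact Or.inl
    · rintro (hxy | ⟨hxa, hyb⟩ | ⟨hxb, hya⟩)
      · exact hxy
      · exact sr_trans (sr_trans hxa hab) (sr_symm hyb)
      · exact sr_trans (sr_trans hxb (sr_symm hab)) (sr_symm hya)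
  · rw [if_pos hpab]
    obtain ⟨na, hna, hrootpa⟩ := (hroots2 a pa).mpr hRa
    obtain ⟨nb, hnb, hrootpb⟩ := (hroots2 b pb).mpr hRb
    have hpaSome : (d2.get? pa).isSome :=
      root_isSome hc2 ((hkeys2 a).mpr hA) ⟨na, hna, hrootpa⟩
    have hpbSome : (d2.get? pb).isSome :=
      root_isSome hc2 ((hkeys2 b).mpr hB) ⟨nb, hnb, hrootpb⟩
    have hlinkd : ∀ y s, RootsTo (d2.insert pb pa) y s ↔
        (RootsTo d y s ∧ s ≠ pb) ∨ (RootsTo d y pb ∧ s = pa) := by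
      intro y s
      rw [link_roots hc2 hrootpb hrootpa hpab y s, hroots2, hroots2]
    refine ⟨link_cert hc2 hrootpb hrootpa hpab hpaSome,
      PySem.Dict.nodup_keys_insert _ _ _ hnd2, ?_, ?_⟩
    · intro y
      by_cases hypb : y = pb
      · rw [hypb, PySem.Dict.get?_insert_self _ pb _]
        simp only [Option.isSome_some, true_iff]
        exact (hkeys2 pb).mp hpbSome
      · rw [PySem.Dict.get?_insert_of_ne _ _ hypb]; exact hkeys2 y
    · intro x y
      constructor
      · rintro ⟨r, hx, hy⟩
        rw [hlinkd] at hx hy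
        rcases hx with ⟨hx, hrne⟩ | ⟨hx, hr1⟩ <;> rcases hy with ⟨hy, hrne2⟩ | ⟨hy, hr2⟩
        · exact Or.inl ⟨r, hx, hy⟩
        · subst hr2
          exact Or.inr (Or.inl ⟨⟨pa, hx, hRa⟩, ⟨pb, hy, hRb⟩⟩)
        · subst hr1
          exact Or.inr (Or.inr ⟨⟨pb, hx, hRb⟩, ⟨pa, hy, hRa⟩⟩)
        · exact Or.inl ⟨pb, hx, hy⟩
      · rintro (⟨r, hx, hy⟩ | ⟨hxa, hyb⟩ | ⟨hxb, hya⟩)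
        · by_cases hrpb : r = pb
          · subst hrpb
            exact ⟨pa, (hlinkd x pa).mpr (Or.inr ⟨hx, rfl⟩),
              (hlinkd y pa).mpr (Or.inr ⟨hy, rfl⟩)⟩
          · exact ⟨r, (hlinkd x r).mpr (Or.inl ⟨hx, hrpb⟩),
              (hlinkd y r).mpr (Or.inl ⟨hy, hrpb⟩)⟩
        · obtain ⟨r1, hx1, ha1⟩ := hxa
          have he1 : r1 = pa := rootsTo_unique ha1 hRa
          subst he1
          obtain ⟨r2, hy2, hb2⟩ := hyb
          have he2 : r2 = pb := rootsTo_unique hb2 hRb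
          subst he2
          exact ⟨pa, (hlinkd x pa).mpr (Or.inl ⟨hx1, hpab⟩),
            (hlinkd y pa).mpr (Or.inr ⟨hy2, rfl⟩)⟩
        · obtain ⟨r1, hx1, hb1⟩ := hxb
          have he1 : r1 = pb := rootsTo_unique hb1 hRb
          subst he1
          obtain ⟨r2, hy2, ha2⟩ := hya
          have he2 : r2 = pa := rootsTo_unique ha2 hRa
          subst he2
          exact ⟨pa, (hlinkd x pa).mpr (Or.inr ⟨hx1, rfl⟩),
            (hlinkd y pa).mpr (Or.inl ⟨hy2, hpab⟩)⟩

-- ===== B-side: label dict =====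

lemma get?_mk_map (l : List (Char × Char)) (g : Char → Char) (k : Char) :
    (PySem.Dict.mk (l.map (fun kv => (kv.1, g kv.2)))).get? k
      = ((PySem.Dict.mk l).get? k).map g := by
  induction l with
  | nil => rfl
  | cons p rest ih =>
    obtain ⟨pk, pv⟩ := p
    rw [List.map_cons, PySem.Dict.get?_mk_cons, PySem.Dict.get?_mk_cons]
    by_cases hpk : pk = k
    · simp [hpk]
    · simp [hpk, ih]

lemma keys_relabel (c : PySem.Dict Char Char) (g : Char → Char) :
    (PySem.Dict.mk (c.items.map (fun kv => (kv.1, g kv.2)))).keys = c.keys := by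
  simp [PySem.Dict.keys, List.map_map, Function.comp]

lemma relabel_isSome (c : PySem.Dict Char Char) (g : Char → Char) (x : Char) :
    ((PySem.Dict.mk (c.items.map (fun kv => (kv.1, g kv.2)))).get? x).isSome
      ↔ ((c.get? x).isSome) := by
  rw [get?_mk_map]
  cases c.get? x <;> simp

lemma relabel_getD (c : PySem.Dict Char Char) (ca cb x : Char)
    (hcb : (c.get? cb).isSome) :
    (PySem.Dict.mk (c.items.map (fun kv => (kv.1, if kv.2 = cb then ca else kv.2)))).getD x x
      = if c.getD x x = cb then ca else c.getD x x := by
  rcases hx : c.get? x with _ | v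
  · have hxcb : x ≠ cb := by
      rintro rfl
      rw [hx] at hcb
      exact absurd hcb (by simp)
    rw [PySem.Dict.getD_eq_get?_getD,
      get?_mk_map (g := fun v => if v = cb then ca else v), hx,
      PySem.Dict.getD_eq_get?_getD, hx]
    simp [hxcb]
  · rw [PySem.Dict.getD_eq_get?_getD,
      get?_mk_map (g := fun v => if v = cb then ca else v), hx,
      PySem.Dict.getD_eq_get?_getD, hx]
    rfl

lemma insert_isSome {d : PySem.Dict Char Char} {y : Char} (k v : Char)
    (hy : (d.get? y).isSome) : ((d.insert k v).get? y).isSome := by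
  by_cases hyk : y = k
  · rw [hyk, PySem.Dict.get?_insert_self _ k _]; rfl
  · rw [PySem.Dict.get?_insert_of_ne _ _ hyk]; exact hy

lemma findA_mono : ∀ (fuel : Nat) (d : PySem.Dict Char Char) (x y : Char),
    (d.get? y).isSome → (((findA fuel d x).2).get? y).isSome := by
  intro fuel
  induction fuel with
  | zero => intro d x y hy; exact hy
  | succ fuel ih =>
    intro d x y hy
    by_cases hroot : d.getD x x = x
    · simpa only [findA, hroot, if_pos] using hy
    · simp only [findA, if_neg hroot]
      exact insert_isSome _ _ (ih d _ y hy)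

lemma unionA_mono {d : PySem.Dict Char Char} {y : Char} (a b : Char)
    (hy : (d.get? y).isSome) : ((unionA d a b).get? y).isSome := by
  unfold unionA
  dsimp only
  split
  · exact insert_isSome _ _ (findA_mono _ _ _ _ (findA_mono _ _ _ _ hy))
  · exact findA_mono _ _ _ _ (findA_mono _ _ _ _ hy)

lemma stepA_mono {d : PySem.Dict Char Char} {y : Char} (e : String)
    (hy : (d.get? y).isSome) : ((stepA d e).get? y).isSome := by
  unfold stepA
  dsimp only
  split
  · split <;> split <;>
      first
        | exact hy
        | exact insert_isSome _ _ hy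
        | exact insert_isSome _ _ (insert_isSome _ _ hy)
  · apply unionA_mono
    split <;> split <;>
      first
        | exact hy
        | exact insert_isSome _ _ hy
        | exact insert_isSome _ _ (insert_isSome _ _ hy)

lemma foldl_stepA_mono : ∀ (l : List String) (d : PySem.Dict Char Char) (y : Char),
    (d.get? y).isSome → ((l.foldl stepA d).get? y).isSome := by
  intro l
  induction l with
  | nil => intro d y hy; exact hy
  | cons e rest ih =>
    intro d y hy
    exact ih _ y (stepA_mono e hy)

-- seeding one endpoint: A inserts a↦a if absent, B setdefaults a↦a
lemma seed_inv {d c : PySem.Dict Char Char} (hinv : INV d c) (a : Char) :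
    INV (if d.contains a then d else d.insert a a) (c.setdefault a a) ∧
    (∀ y, ((if d.contains a then d else d.insert a a).get? y).isSome
      ↔ ((d.get? y).isSome ∨ y = a)) := by
  obtain ⟨hndd, hndc, hK, ⟨h, hc⟩, hV, hL⟩ := hinv
  have hcontains : d.contains a = c.contains a := by
    rw [PySem.Dict.contains_eq_isSome_get?, PySem.Dict.contains_eq_isSome_get?]
    exact Bool.eq_iff_iff.mpr (by simpa using hK a)
  by_cases hda : d.contains a = true
  · rw [if_pos hda, PySem.Dict.setdefault_of_contains _ _ (hcontains ▸ hda)]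
    refine ⟨⟨hndd, hndc, hK, ⟨h, hc⟩, hV, hL⟩, ?_⟩
    intro y
    constructor
    · exact Or.inl
    · rintro (hy | rfl)
      · exact hy
      · rw [PySem.Dict.contains_eq_isSome_get?] at hda; exact hda
  · have hda' : d.contains a = false := by simpa using hda
    have hdaN : d.get? a = none := by
      rw [PySem.Dict.contains_eq_isSome_get?] at hda'
      rcases hg : d.get? a with _ | v
      · rfl
      · rw [hg] at hda'; simp at hda'
    have hcaN : c.get? a = none := by
      rcases hg : c.get? a with _ | v
      · rfl
      · have := (hK a).mpr (by simp [hg])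
        rw [hdaN] at this; simp at this
    rw [if_neg hda, PySem.Dict.setdefault_of_not_contains _ _ (hcontains ▸ hda')]
    have hroots' : ∀ y s, RootsTo (d.insert a a) y s ↔ RootsTo d y s :=
      fresh_insert_roots hdaN
    have hlab' : ∀ z, (c.insert a a).getD z z = if z = a then a else c.getD z z := by
      intro z
      by_cases hz : z = a
      · rw [hz, if_pos rfl, PySem.Dict.getD_eq_get?_getD, PySem.Dict.get?_insert_self _ a _]
        rfl
      · rw [if_neg hz, PySem.Dict.getD_eq_get?_getD, PySem.Dict.get?_insert_of_ne _ _ hz,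
          ← PySem.Dict.getD_eq_get?_getD]
    have hvalK : ∀ z v, c.get? z = some v → v ≠ a := by
      intro z v hzv hva
      have := hV z v hzv
      rw [hva, hcaN] at this
      simp at this
    refine ⟨⟨PySem.Dict.nodup_keys_insert _ _ _ hndd, PySem.Dict.nodup_keys_insert _ _ _ hndc,
      ?_, ⟨h, fresh_insert_cert hc hdaN⟩, ?_, ?_⟩, ?_⟩
    · intro y
      by_cases hy : y = a
      · rw [hy, PySem.Dict.get?_insert_self _ a _, PySem.Dict.get?_insert_self _ a _]
      · rw [PySem.Dict.get?_insert_of_ne _ _ hy, PySem.Dict.get?_insert_of_ne _ _ hy]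
        exact hK y
    · intro x v hxv
      by_cases hx : x = a
      · rw [hx, PySem.Dict.get?_insert_self _ a _] at hxv
        have hv : v = a := by injection hxv.symm
        rw [hv, PySem.Dict.get?_insert_self _ a _]
        rfl
      · rw [PySem.Dict.get?_insert_of_ne _ _ hx] at hxv
        exact insert_isSome _ _ (hV x v hxv)
    · intro x y hx hy
      have hSR' : SR (d.insert a a) x y ↔ SR d x y := by
        constructor
        · rintro ⟨r, h1, h2⟩; exact ⟨r, (hroots' _ _).mp h1, (hroots' _ _).mp h2⟩
        · rintro ⟨r, h1, h2⟩; exact ⟨r, (hroots' _ _).mpr h1, (hroots' _ _).mpr h2⟩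
      rw [hSR', hlab' x, hlab' y]
      by_cases hxa : x = a <;> by_cases hya : y = a
      · rw [if_pos hxa, if_pos hya, hxa, hya]
        have hroota : IsRootD d a := by
          unfold IsRootD
          rw [PySem.Dict.getD_eq_get?_getD, hdaN]
          rfl
        exact iff_of_true ⟨a, rootsTo_self hroota, rootsTo_self hroota⟩ rfl
      · -- x = a, y an old key
        rw [if_pos hxa, if_neg hya]
        have hdxN : d.get? x = none := by rw [hxa]; exact hdaN
        have hyd : (d.get? y).isSome := by
          rw [PySem.Dict.get?_insert_of_ne _ _ hya] at hy
          exact hy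
        have hlhs : ¬ SR d x y := by
          rintro ⟨r, h1, h2⟩
          have hrootx : IsRootD d x := by
            unfold IsRootD
            rw [PySem.Dict.getD_eq_get?_getD, hdxN]
            rfl
          have hrx : r = x := rootsTo_unique h1 (rootsTo_self hrootx)
          rw [hrx] at h2
          have := root_isSome hc hyd h2
          rw [hdxN] at this
          simp at this
        obtain ⟨v, hv⟩ : ∃ v, c.get? y = some v := by
          have := (hK y).mp hyd
          rcases hg : c.get? y with _ | v
          · rw [hg] at this; simp at this
          · exact ⟨v, rfl⟩
        have hrhs : a ≠ c.getD y y := by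
          rw [PySem.Dict.getD_eq_get?_getD, hv]
          intro he
          exact hvalK y v hv he.symm
        exact iff_of_false hlhs hrhs
      · -- y = a, x an old key
        rw [if_neg hxa, if_pos hya]
        have hdyN : d.get? y = none := by rw [hya]; exact hdaN
        have hxd : (d.get? x).isSome := by
          rw [PySem.Dict.get?_insert_of_ne _ _ hxa] at hx
          exact hx
        have hlhs : ¬ SR d x y := by
          rintro ⟨r, h1, h2⟩
          have hrooty : IsRootD d y := by
            unfold IsRootD
            rw [PySem.Dict.getD_eq_get?_getD, hdyN]
            rfl
          have hry : r = y := rootsTo_unique h2 (rootsTo_self hrooty)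
          rw [hry] at h1
          have := root_isSome hc hxd h1
          rw [hdyN] at this
          simp at this
        obtain ⟨v, hv⟩ : ∃ v, c.get? x = some v := by
          have := (hK x).mp hxd
          rcases hg : c.get? x with _ | v
          · rw [hg] at this; simp at this
          · exact ⟨v, rfl⟩
        have hrhs : c.getD x x ≠ a := by
          rw [PySem.Dict.getD_eq_get?_getD, hv]
          exact hvalK x v hv
        exact iff_of_false hlhs hrhs
      · rw [if_neg hxa, if_neg hya]
        have hxd : (d.get? x).isSome := by
          rw [PySem.Dict.get?_insert_of_ne _ _ hxa] at hx
          exact hx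
        have hyd : (d.get? y).isSome := by
          rw [PySem.Dict.get?_insert_of_ne _ _ hya] at hy
          exact hy
        exact hL x y hxd hyd
    · intro y
      by_cases hy : y = a
      · rw [hy, PySem.Dict.get?_insert_self _ a _]
        simp
      · rw [PySem.Dict.get?_insert_of_ne _ _ hy]
        simp [hy]

-- merging: A unions the roots of a and b, B rewrites b's component label to a's
lemma merge_inv {d c : PySem.Dict Char Char} (hinv : INV d c) {a b : Char}
    (hA : (d.get? a).isSome) (hB : (d.get? b).isSome) :
    INV (unionA d a b)
        (if c.getD a a ≠ c.getD b b
         then PySem.Dict.mk (c.items.map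
            (fun kv => (kv.1, if kv.2 = c.getD b b then c.getD a a else kv.2)))
         else c) := by
  obtain ⟨hndd, hndc, hK, ⟨h, hc⟩, hV, hL⟩ := hinv
  obtain ⟨hcert', hnd', hkeys', hSR'⟩ := unionA_spec hc hndd hA hB
  have hcA : (c.get? a).isSome := (hK a).mp hA
  have hcB : (c.get? b).isSome := (hK b).mp hB
  obtain ⟨ca, hca⟩ : ∃ v, c.get? a = some v := by
    rcases hg : c.get? a with _ | v
    · rw [hg] at hcA; simp at hcA
    · exact ⟨v, rfl⟩
  obtain ⟨cb, hcb⟩ : ∃ v, c.get? b = some v := by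
    rcases hg : c.get? b with _ | v
    · rw [hg] at hcB; simp at hcB
    · exact ⟨v, rfl⟩
  have hlaba : c.getD a a = ca := by rw [PySem.Dict.getD_eq_get?_getD, hca]; rfl
  have hlabb : c.getD b b = cb := by rw [PySem.Dict.getD_eq_get?_getD, hcb]; rfl
  have hcbSome : (c.get? cb).isSome := hV b cb hcb
  have hcaSome : (c.get? ca).isSome := hV a ca hca
  by_cases hcacb : c.getD a a = c.getD b b
  · rw [if_neg (by simpa using hcacb)]
    have hab : SR d a b := (hL a b hA hB).mpr hcacb
    refine ⟨hnd', hndc, fun y => (hkeys' y).trans (hK y), hcert', hV, ?_⟩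
    intro x y hx hy
    rw [hSR' x y]
    constructor
    · rintro (hxy | ⟨hxa, hyb⟩ | ⟨hxb, hya⟩)
      · exact (hL x y ((hkeys' x).mp hx) ((hkeys' y).mp hy)).mp hxy
      · exact (hL x y ((hkeys' x).mp hx) ((hkeys' y).mp hy)).mp
          (sr_trans (sr_trans hxa hab) (sr_symm hyb))
      · exact (hL x y ((hkeys' x).mp hx) ((hkeys' y).mp hy)).mp
          (sr_trans (sr_trans hxb (sr_symm hab)) (sr_symm hya))
    · intro hlab
      exact Or.inl ((hL x y ((hkeys' x).mp hx) ((hkeys' y).mp hy)).mpr hlab)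
  · rw [if_pos hcacb]
    have hnecacb : ca ≠ cb := by rw [← hlaba, ← hlabb]; exact hcacb
    have hlabrel : ∀ x, (PySem.Dict.mk (c.items.map
        (fun kv => (kv.1, if kv.2 = c.getD b b then c.getD a a else kv.2)))).getD x x
        = if c.getD x x = cb then ca else c.getD x x := by
      intro x
      rw [hlaba, hlabb]
      exact relabel_getD c ca cb x hcbSome
    refine ⟨hnd', ?_, ?_, hcert', ?_, ?_⟩
    · rw [keys_relabel c (fun v => if v = c.getD b b then c.getD a a else v)]; exact hndc
    · intro y
      rw [hkeys' y, hK y]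
      exact (relabel_isSome c (fun v => if v = c.getD b b then c.getD a a else v) y).symm
    · -- V for the relabeled dict
      intro x v hxv
      rw [get?_mk_map (g := (fun v => if v = c.getD b b then c.getD a a else v))] at hxv
      rcases hg : c.get? x with _ | w
      · rw [hg] at hxv; simp at hxv
      · rw [hg] at hxv
        have hv : v = if w = c.getD b b then c.getD a a else w := by injection hxv.symm
        rw [relabel_isSome c (fun v => if v = c.getD b b then c.getD a a else v)]
        rw [hv]
        by_cases hw : w = c.getD b b
        · rw [if_pos hw, hlaba]; exact hcaSome
        · rw [if_neg hw]; exact hV x w hg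
    · intro x y hx hy
      have hxd : (d.get? x).isSome := (hkeys' x).mp hx
      have hyd : (d.get? y).isSome := (hkeys' y).mp hy
      rw [hSR' x y, hlabrel x, hlabrel y]
      have hxy := hL x y hxd hyd
      have hxa := hL x a hxd hA
      have hya := hL y a hyd hA
      have hxb := hL x b hxd hB
      have hyb := hL y b hyd hB
      rw [hlaba] at hxa hya
      rw [hlabb] at hxb hyb
      by_cases hlx : c.getD x x = cb <;> by_cases hly : c.getD y y = cb
      · rw [if_pos hlx, if_pos hly]
        refine iff_of_true (Or.inl ?_) rfl
        exact hxy.mpr (hlx.trans hly.symm)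
      · rw [if_pos hlx, if_neg hly]
        constructor
        · rintro (hxy' | ⟨hxa', hyb'⟩ | ⟨hxb', hya'⟩)
          · exact absurd (hxy.mp hxy' ▸ hlx) hly
          · exact absurd (hyb.mp hyb') hly
          · exact (hya.mp hya').symm
        · intro he
          exact Or.inr (Or.inr ⟨hxb.mpr hlx, hya.mpr he.symm⟩)
      · rw [if_neg hlx, if_pos hly]
        constructor
        · rintro (hxy' | ⟨hxa', hyb'⟩ | ⟨hxb', hya'⟩)
          · exact absurd ((hxy.mp hxy').symm ▸ hly) hlx
          · exact hxa.mp hxa'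
          · exact absurd (hxb.mp hxb') hlx
        · intro he
          exact Or.inr (Or.inl ⟨hxa.mpr he, hyb.mpr hly⟩)
      · rw [if_neg hlx, if_neg hly]
        constructor
        · rintro (hxy' | ⟨hxa', hyb'⟩ | ⟨hxb', hya'⟩)
          · exact hxy.mp hxy'
          · exact absurd (hyb.mp hyb') hly
          · exact absurd (hxb.mp hxb') hlx
        · intro he
          exact Or.inl (hxy.mpr he)

-- ===== the per-equation step =====

lemma step_inv {d c : PySem.Dict Char Char} (hinv : INV d c) (e : String) :
    INV (stepA d e) (stepB c e) ∧
    (∀ y, ((stepA d e).get? y).isSome ↔ ((d.get? y).isSome ∨ y = eqa e ∨ y = eqb e)) := by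
  obtain ⟨hinv1, hkeys1⟩ := seed_inv hinv (eqa e)
  set d1 := if d.contains (eqa e) then d else d.insert (eqa e) (eqa e) with hd1v
  set c1 := c.setdefault (eqa e) (eqa e) with hc1v
  obtain ⟨hinv2, hkeys2⟩ := seed_inv hinv1 (eqb e)
  set d2 := if d1.contains (eqb e) then d1 else d1.insert (eqb e) (eqb e) with hd2v
  set c2 := c1.setdefault (eqb e) (eqb e) with hc2v
  have hA : (d2.get? (eqa e)).isSome := (hkeys2 _).mpr (Or.inl ((hkeys1 _).mpr (Or.inr rfl)))
  have hB : (d2.get? (eqb e)).isSome := (hkeys2 _).mpr (Or.inr rfl)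
  have hstepA : stepA d e = (if eqop e = '!' then d2 else unionA d2 (eqa e) (eqb e)) := rfl
  have hstepB : stepB c e =
      (if eqop e ≠ '!' then
        (if c2.getD (eqa e) (eqa e) ≠ c2.getD (eqb e) (eqb e)
         then PySem.Dict.mk (c2.items.map (fun kv =>
           (kv.1, if kv.2 = c2.getD (eqb e) (eqb e) then c2.getD (eqa e) (eqa e) else kv.2)))
         else c2)
      else c2) := rfl
  rw [hstepA, hstepB]
  by_cases hop : eqop e = '!'
  · rw [if_pos hop, if_neg (by simpa using hop)]
    refine ⟨hinv2, ?_⟩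
    intro y
    rw [hkeys2 y, hkeys1 y]
    exact or_assoc
  · rw [if_neg hop, if_pos hop]
    refine ⟨merge_inv hinv2 hA hB, ?_⟩
    obtain ⟨hnd2, _, _, ⟨h2, hc2⟩, _, _⟩ := hinv2
    obtain ⟨_, _, hkeys', _⟩ := unionA_spec hc2 hnd2 hA hB
    intro y
    rw [hkeys' y, hkeys2 y, hkeys1 y]
    exact or_assoc

lemma fold_inv : ∀ (l : List String) (d c : PySem.Dict Char Char), INV d c →
    INV (l.foldl stepA d) (l.foldl stepB c) ∧
    (∀ e ∈ l, ((l.foldl stepA d).get? (eqa e)).isSome ∧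
              ((l.foldl stepA d).get? (eqb e)).isSome) := by
  intro l
  induction l with
  | nil =>
    intro d c hinv
    exact ⟨hinv, by simp⟩
  | cons e rest ih =>
    intro d c hinv
    simp only [List.foldl_cons]
    obtain ⟨hstep, hkeysf⟩ := step_inv hinv e
    obtain ⟨hinv', hkeys'⟩ := ih _ _ hstep
    refine ⟨hinv', ?_⟩
    intro f hf
    rcases List.mem_cons.mp hf with hfe | hf'
    · subst hfe
      constructor
      · exact foldl_stepA_mono rest _ _ ((hkeysf _).mpr (Or.inr (Or.inl rfl)))
      · exact foldl_stepA_mono rest _ _ ((hkeysf _).mpr (Or.inr (Or.inr rfl)))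
    · exact hkeys' f hf' 

lemma pass2_eq (c : PySem.Dict Char Char) :
    ∀ (l : List String) (d : PySem.Dict Char Char), INV d c →
    (∀ e ∈ l, (d.get? (eqa e)).isSome ∧ (d.get? (eqb e)).isSome) →
    pass2A d l = l.all (fun e =>
      if eqop e = '=' then true
      else decide (c.getD (eqa e) (eqa e) ≠ c.getD (eqb e) (eqb e))) := by
  intro l
  induction l with
  | nil => intro d _ _; rfl
  | cons e rest ih =>
    intro d hinv hkeys
    obtain ⟨hndd, hndc, hK, ⟨h, hc⟩, hV, hL⟩ := hinv
    have hA : (d.get? (eqa e)).isSome := (hkeys e (by simp)).1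
    have hB : (d.get? (eqb e)).isSome := (hkeys e (by simp)).2
    rw [List.all_cons]
    simp only [eqa, eqb, eqop] at hA hB ⊢
    simp only [pass2A]
    set A := (PySem.Str.pyGet? e 0).getD ' ' with hAv
    set B := (PySem.Str.pyGet? e 3).getD ' ' with hBv
    by_cases hop : (PySem.Str.pyGet? e 1).getD ' ' = '='
    · rw [if_pos hop, if_pos hop, Bool.true_and]
      exact ih d ⟨hndd, hndc, hK, ⟨h, hc⟩, hV, hL⟩ (fun f hf => hkeys f (by simp [hf]))
    · rw [if_neg hop, if_neg hop]
      obtain ⟨hRa, hrp1⟩ := findA_spec hc hndd A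
      set pa := (findA (d.size + 1) d A).1 with hpav
      set d1 := (findA (d.size + 1) d A).2 with hd1v
      have hc1 : CertH d1 h := repoint_cert hc hrp1
      have hnd1 : d1.keys.Nodup := findA_nodup _ _ _ hndd
      obtain ⟨hRb1, hrp2⟩ := findA_spec hc1 hnd1 B
      set pb := (findA (d1.size + 1) d1 B).1 with hpbv
      set d2 := (findA (d1.size + 1) d1 B).2 with hd2v
      have hRb : RootsTo d B pb := (repoint_rootsTo hc hrp1 _ _).mp hRb1
      have hrp : Repoint d d2 := repoint_trans hc hrp1 hrp2
      have hiff : pa = pb ↔ c.getD A A = c.getD B B := by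
        rw [← hL _ _ hA hB]
        constructor
        · intro hpe; exact ⟨pa, hRa, hpe ▸ hRb⟩
        · rintro ⟨r, h1, h2⟩
          rw [← rootsTo_unique h1 hRa, ← rootsTo_unique h2 hRb]
      by_cases heq : c.getD A A = c.getD B B
      · rw [if_pos (hiff.mpr heq)]
        have hdec : (decide (c.getD A A ≠ c.getD B B)) = false := by simp [heq]
        simp only [← hAv, ← hBv, hdec, Bool.false_and]
      · rw [if_neg (fun hpe => heq (hiff.mp hpe))]
        have hL2 : ∀ x y, (d2.get? x).isSome → (d2.get? y).isSome →
            (SR d2 x y ↔ c.getD x x = c.getD y y) := by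
          intro x y hx hy
          have hSR2 : SR d2 x y ↔ SR d x y := by
            constructor
            · rintro ⟨r, h1', h2'⟩
              exact ⟨r, (repoint_rootsTo hc hrp _ _).mp h1',
                (repoint_rootsTo hc hrp _ _).mp h2'⟩
            · rintro ⟨r, h1', h2'⟩
              exact ⟨r, (repoint_rootsTo hc hrp _ _).mpr h1',
                (repoint_rootsTo hc hrp _ _).mpr h2'⟩
          rw [hSR2]
          exact hL x y ((repoint_keys hrp x).mp hx) ((repoint_keys hrp y).mp hy)
        have hinv2 : INV d2 c := ⟨findA_nodup _ _ _ hnd1, hndc,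
          fun y => (repoint_keys hrp y).trans (hK y), ⟨h, repoint_cert hc hrp⟩, hV, hL2⟩
        rw [ih d2 hinv2 (fun f hf =>
          ⟨(repoint_keys hrp _).mpr (hkeys f (by simp [hf])).1,
           (repoint_keys hrp _).mpr (hkeys f (by simp [hf])).2⟩)]
        have hdec : (decide (c.getD A A ≠ c.getD B B)) = true := by simp [heq]
        simp only [← hAv, ← hBv, hdec, Bool.true_and]
        rfl

lemma inv_empty : INV PySem.Dict.empty PySem.Dict.empty := by
  refine ⟨by simp [PySem.Dict.keys_empty], by simp [PySem.Dict.keys_empty],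
    fun y => by simp [PySem.Dict.get?_empty],
    ⟨fun _ => 0, fun k v hkv => by simp [PySem.Dict.get?_empty] at hkv⟩,
    fun x v hxv => by simp [PySem.Dict.get?_empty] at hxv,
    fun x y hx _ => by simp [PySem.Dict.get?_empty] at hx⟩


-- ===== VERDICT (by name: the statement is the Claim_ definition above) =====
theorem equationsPossible_spec : Claim_equal_equationsPossible := by
  intro equations _ _
  unfold Spec_equationsPossible equationsPossible equationsPossible_alt
  obtain ⟨hinv, hkeys⟩ := fold_inv equations PySem.Dict.empty PySem.Dict.empty inv_empty
  exact pass2_eq (equations.foldl stepB PySem.Dict.empty) equations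
    (equations.foldl stepA PySem.Dict.empty) hinv hkeys
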